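-- pv_equiv track=rewrite | github.com/F4NTech/modstan | main.py | swap_bytes
-- ===== SOURCE A (Python) =====
-- def swap_bytes(registers, format):
--     if format == 'ABCD':
--         return registers
--     elif format == 'CDAB':
--         return registers[::-1]
--     elif format == 'AB':  # No swap, just return the registers as they are
--         return registers
--     elif format == 'BA':  # Swap bytes within each 16-bit register
--         swapped = []
--         for reg in registers:
--             swapped.append(((reg & 0xFF) << 8) | ((reg >> 8) & 0xFF))
--         return swapped
--     elif format == 'BADC':
--         swapped = []
--         for reg in registers:
--             swapped.append(((reg & 0xFF) << 8) | ((reg >> 8) & 0xFF))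
--         return swapped
--     elif format == 'DCBA':
--         return swap_bytes(registers[::-1], 'BADC')
--     else:
--         raise ValueError(f"Unsupported byte format: {format}")
-- ===== SOURCE B (Python) =====
-- def _swap_word(reg):
--     # low/high byte via arithmetic: reduce to 16 bits, split with divmod, recombine
--     hi, lo = divmod(reg % 0x10000, 0x100)
--     return lo * 0x100 + hi
--
--
-- def swap_bytes(registers, format):
--     if format in ('ABCD', 'AB'):
--         return registers
--     if format == 'CDAB':
--         return list(reversed(registers))
--     if format in ('BA', 'BADC'):
--         return [_swap_word(r) for r in registers]
--     if format == 'DCBA':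
--         # single fused pass: swap each word and prepend, reversing on the fly
--         out = []
--         for r in registers:
--             out = [_swap_word(r)] + out
--         return out
--     raise ValueError(f"Unsupported byte format: {format}")
-- ===== Notes on version B (the rewrite author's own statement) =====
-- stated objective: alternative
-- what changed: Byte swap done by divmod/multiply arithmetic on reg mod 2^16 instead of mask/shift/or bit operations, DCBA computed in one fused forward pass that prepends swapped words (no list reversal and no self-recursion), and CDAB uses reversed() instead of a slice.
-- outside the precondition, e.g. on swap_bytes([1], 'XY'): A raises ValueError, B raises ValueError
import Mathlib
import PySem

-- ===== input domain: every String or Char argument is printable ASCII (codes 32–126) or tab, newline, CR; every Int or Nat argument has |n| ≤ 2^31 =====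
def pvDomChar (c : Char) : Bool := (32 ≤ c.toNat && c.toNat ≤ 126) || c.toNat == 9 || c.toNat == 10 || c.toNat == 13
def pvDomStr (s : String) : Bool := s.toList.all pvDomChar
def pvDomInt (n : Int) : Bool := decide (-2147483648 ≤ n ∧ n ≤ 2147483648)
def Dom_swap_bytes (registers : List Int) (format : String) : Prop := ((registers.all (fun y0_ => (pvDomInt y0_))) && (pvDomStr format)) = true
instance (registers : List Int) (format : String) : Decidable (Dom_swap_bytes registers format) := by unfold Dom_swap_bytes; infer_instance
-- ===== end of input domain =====

-- B swaps bytes by divmod/multiply arithmetic on reg mod 2^16 (no bit operations), computes DCBA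
-- in one fused forward pass that prepends swapped words (no reversal pass, no self-recursion),
-- and reverses CDAB with reversed() instead of a slice; objective: alternative.


-- ===== PORT A =====
-- the loop body of the BA/BADC branches: swapped.append(((reg & 0xFF) << 8) | ((reg >> 8) & 0xFF))
def swapBytesStepA (acc : List Int) (reg : Int) : List Int :=
  acc ++ [PySem.Int.bor ((PySem.Int.band reg 0xFF) <<< (8:Nat)) (PySem.Int.band (reg >>> (8:Nat)) 0xFF)]

def swap_bytes (registers : List Int) (format : String) : List Int :=
  if format == "ABCD" then registers
  else if format == "CDAB" then (PySem.List.slice? registers none none (-1)).getD []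
  else if format == "AB" then registers
  else if format == "BA" then registers.foldl swapBytesStepA []
  else if format == "BADC" then registers.foldl swapBytesStepA []
  else if format == "DCBA" then
    -- swap_bytes(registers[::-1], 'BADC'): the recursive call inlined to its 'BADC' branch
    ((PySem.List.slice? registers none none (-1)).getD []).foldl swapBytesStepA []
  else []  -- raise ValueError: excluded by Pre_swap_bytes

-- ===== PORT B =====
-- hi, lo = divmod(reg % 0x10000, 0x100); return lo * 0x100 + hi
def swapWordB (reg : Int) : Int :=
  let m := PySem.Int.mod reg 65536
  let hi := PySem.Int.floordiv m 256
  let lo := PySem.Int.mod m 256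
  lo * 256 + hi

def swap_bytes_alt (registers : List Int) (format : String) : List Int :=
  if format == "ABCD" || format == "AB" then registers
  else if format == "CDAB" then registers.reverse
  else if format == "BA" || format == "BADC" then registers.map swapWordB
  else if format == "DCBA" then
    registers.foldl (fun out r => [swapWordB r] ++ out) []
  else []  -- raise ValueError: excluded by Pre_swap_bytes

-- ===== PRECONDITION & SPEC =====
-- A raises ValueError exactly when format is not one of the six supported codes; those inputs are excluded.
def Pre_swap_bytes (_registers : List Int) (format : String) : Prop :=
  format ∈ ["ABCD", "CDAB", "AB", "BA", "BADC", "DCBA"]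
instance (registers : List Int) (format : String) : Decidable (Pre_swap_bytes registers format) := by unfold Pre_swap_bytes; infer_instance
def pvWitness_swap_bytes : List Int × String := ([1, 258], "DCBA")

def Spec_swap_bytes (registers : List Int) (format : String) (out : List Int) : Prop := out = swap_bytes_alt registers format
instance (registers : List Int) (format : String) (out : List Int) : Decidable (Spec_swap_bytes registers format out) := by unfold Spec_swap_bytes; infer_instance

-- ===== CLAIM (what is proved, stated in full; the proofs are below) =====
def Claim_equal_swap_bytes : Prop := ∀ (registers : List Int) (format : String), Dom_swap_bytes registers format → Pre_swap_bytes registers format → Spec_swap_bytes registers format (swap_bytes registers format)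

-- ===== LEMMAS AND PROOFS =====
theorem band255 (r : Int) : PySem.Int.band r 255 = r % 256 := by
  rcases r with n | n
  · have h := Nat.and_two_pow_sub_one_eq_mod n 8
    norm_num at h
    simp [PySem.Int.band, h]
  · have h := Nat.and_two_pow_sub_one_eq_mod n 8
    norm_num at h
    simp [PySem.Int.band, Int.negSucc_eq, Nat.and_comm, h]
    omega

theorem shr8 (r : Int) : r >>> (8:Nat) = r / 256 := by
  rcases r with n | n
  · show Int.ofNat (n >>> 8) = _
    rw [Nat.shiftRight_eq_div_pow]
    norm_num
  · show Int.negSucc (n >>> 8) = _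
    rw [Nat.shiftRight_eq_div_pow]
    simp [Int.negSucc_eq]
    omega

-- A's bitwise byte swap equals B's arithmetic byte swap, for every Int
theorem word_eq (r : Int) :
    PySem.Int.bor ((PySem.Int.band r 255) <<< (8:Nat)) (PySem.Int.band (r >>> (8:Nat)) 255)
      = swapWordB r := by
  show _ = (PySem.Int.mod (PySem.Int.mod r 65536) 256) * 256 + PySem.Int.floordiv (PySem.Int.mod r 65536) 256
  rw [band255, shr8, band255]
  rw [PySem.Int.mod_eq_emod_of_pos (a:=r) (b:=65536) (by norm_num),
      PySem.Int.mod_eq_emod_of_pos (a:=r % 65536) (b:=256) (by norm_num),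
      PySem.Int.floordiv_eq_ediv_of_pos (a:=r % 65536) (b:=256) (by norm_num)]
  have h1 : (0:Int) ≤ r % 256 := Int.emod_nonneg r (by norm_num)
  have h2 : r % 256 < 256 := Int.emod_lt_of_pos r (by norm_num)
  have h3 : (0:Int) ≤ (r/256) % 256 := Int.emod_nonneg _ (by norm_num)
  have h4 : (r/256) % 256 < 256 := Int.emod_lt_of_pos _ (by norm_num)
  have hs : (r % 256) <<< (8:Nat) = (r % 256) * 256 := by
    rw [Int.shiftLeft_eq]; norm_num
  rw [hs, PySem.Int.bor_of_nonneg (by positivity) h3]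
  have hor : ((r % 256) * 256).toNat ||| ((r/256) % 256).toNat
      = ((r % 256) * 256).toNat + ((r/256) % 256).toNat := by
    have hlt : ((r/256) % 256).toNat < 2^8 := by omega
    have h := Nat.shiftLeft_add_eq_or_of_lt (a := (r % 256).toNat) hlt
    have he : (r % 256 * 256).toNat = (r % 256).toNat <<< 8 := by
      rw [Nat.shiftLeft_eq]; omega
    rw [he, ← h]
  rw [hor]
  omega

theorem foldl_swapBytesStepA (l acc : List Int) :
    l.foldl swapBytesStepA acc = acc ++ l.map swapWordB := by
  induction l generalizing acc with
  | nil => simp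
  | cons x xs ih => simp [List.foldl, swapBytesStepA, word_eq, ih]

theorem foldr_swapBytesStepA (l : List Int) :
    List.foldr (fun x y => swapBytesStepA y x) [] l = (l.map swapWordB).reverse := by
  rw [← List.foldl_reverse, foldl_swapBytesStepA, List.map_reverse]
  simp

-- ===== VERDICT (by name: the statement is the Claim_ definition above) =====
theorem swap_bytes_spec : Claim_equal_swap_bytes := by
  intro registers format _ hpre
  simp only [Pre_swap_bytes, List.mem_cons, List.not_mem_nil, or_false] at hpre
  rcases hpre with h | h | h | h | h | h
  all_goals
    subst h
    simp [Spec_swap_bytes, swap_bytes, swap_bytes_alt, foldl_swapBytesStepA,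
          foldr_swapBytesStepA, PySem.List.slice?_none_none_neg_one]
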